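-- pv_equiv track=rewrite | github.com/lutacluny/Sheet-Music-Recognition | object_detection/identify_lines.py | calc_space_indices_above_upper_line
-- ===== SOURCE A (Python) =====
-- def calc_space_indices_above_upper_line(pixel_between_black_structures):
--     space_indices_above_upper_line = []
--     counter = 0
--
--     for space in pixel_between_black_structures:
--         if (counter - 1) % 5 == 0:
--             space_indices_above_upper_line.append(counter)
--
--         counter += 1
--
--     return space_indices_above_upper_line
-- ===== SOURCE B (Python) =====
-- def calc_space_indices_above_upper_line(pixel_between_black_structures):
--     return list(range(1, len(pixel_between_black_structures), 5))
-- ===== Notes on version B (the rewrite author's own statement) =====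
-- stated objective: simpler
-- what changed: Replaces the counter loop with a modulo test by a single closed-form range(1, len(xs), 5), generating the arithmetic progression 1, 6, 11, ... directly.
import Mathlib
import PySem

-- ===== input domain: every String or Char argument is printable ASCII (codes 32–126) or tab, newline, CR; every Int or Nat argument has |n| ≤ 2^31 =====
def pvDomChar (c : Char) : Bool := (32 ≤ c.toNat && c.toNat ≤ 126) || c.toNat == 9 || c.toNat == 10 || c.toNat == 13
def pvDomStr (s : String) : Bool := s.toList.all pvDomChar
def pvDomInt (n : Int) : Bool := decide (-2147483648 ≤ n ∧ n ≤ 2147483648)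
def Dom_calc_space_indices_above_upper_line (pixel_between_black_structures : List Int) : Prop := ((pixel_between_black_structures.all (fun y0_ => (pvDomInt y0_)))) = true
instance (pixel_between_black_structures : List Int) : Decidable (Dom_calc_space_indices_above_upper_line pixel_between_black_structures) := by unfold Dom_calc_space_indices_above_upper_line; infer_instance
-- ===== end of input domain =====

-- B replaces A's counter loop and modulo test by the closed-form range(1, len(xs), 5); objective: simpler.

-- ===== PORT A =====
-- literal transliteration: accumulator list + counter, append when (counter-1) % 5 == 0
def calc_space_indices_above_upper_line (pixel_between_black_structures : List Int) : List Int :=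
  (pixel_between_black_structures.foldl
    (fun (st : List Int × Int) (_space : Int) =>
      (if PySem.Int.mod (st.2 - 1) 5 == 0 then st.1 ++ [st.2] else st.1, st.2 + 1))
    ([], 0)).1

-- ===== PORT B =====
def calc_space_indices_above_upper_line_alt (pixel_between_black_structures : List Int) : List Int :=
  PySem.List.pyRange 1 (PySem.List.len pixel_between_black_structures) 5

-- ===== PRECONDITION & SPEC =====
def Spec_calc_space_indices_above_upper_line (pixel_between_black_structures : List Int) (out : List Int) : Prop := out = calc_space_indices_above_upper_line_alt pixel_between_black_structures
instance (pixel_between_black_structures : List Int) (out : List Int) : Decidable (Spec_calc_space_indices_above_upper_line pixel_between_black_structures out) := by unfold Spec_calc_space_indices_above_upper_line; infer_instance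

-- ===== CLAIM (what is proved, stated in full; the proofs are below) =====
def Claim_equal_calc_space_indices_above_upper_line : Prop := ∀ (pixel_between_black_structures : List Int), Dom_calc_space_indices_above_upper_line pixel_between_black_structures → Spec_calc_space_indices_above_upper_line pixel_between_black_structures (calc_space_indices_above_upper_line pixel_between_black_structures)

-- ===== LEMMAS AND PROOFS =====

theorem pyRange5_nil (a b : Int) (h : b ≤ a) : PySem.List.pyRange a b 5 = [] := by
  rw [PySem.List.pyRange_of_pos _ _ (by norm_num)]
  rw [if_neg (by omega)]
  simp

theorem pyRange5_cons (a b : Int) (h : a < b) :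
    PySem.List.pyRange a b 5 = a :: PySem.List.pyRange (a + 5) b 5 := by
  rw [PySem.List.pyRange_of_pos _ _ (by norm_num), PySem.List.pyRange_of_pos _ _ (by norm_num)]
  rw [if_pos h]
  have h5 : ((b - a + 5 - 1) / 5).toNat
      = (if a + 5 < b then ((b - (a + 5) + 5 - 1) / 5).toNat else 0) + 1 := by
    split_ifs with h2 <;> omega
  rw [h5, List.range_succ_eq_map, List.map_cons, List.map_map]
  refine congrArg₂ _ (by push_cast; ring) ?_
  refine List.map_congr_left ?_
  intro k _
  simp only [Function.comp]
  push_cast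
  ring

theorem loopA (xs : List Int) : ∀ (acc : List Int) (c : Int), 0 ≤ c →
    (xs.foldl
      (fun (st : List Int × Int) (_space : Int) =>
        (if PySem.Int.mod (st.2 - 1) 5 == 0 then st.1 ++ [st.2] else st.1, st.2 + 1))
      (acc, c))
    = (acc ++ PySem.List.pyRange (c + (1 - c) % 5) (c + (xs.length : Int)) 5,
       c + (xs.length : Int)) := by
  induction xs with
  | nil =>
    intro acc c hc
    simp [pyRange5_nil (c + (1 - c) % 5) c (by omega)]
  | cons x xs ih =>
    intro acc c hc
    rw [List.foldl_cons]
    dsimp only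
    by_cases h : (c - 1) % 5 = 0
    · rw [if_pos (by simp [PySem.Int.mod, Int.fmod_eq_emod, h])]
      rw [ih (acc ++ [c]) (c + 1) (by omega)]
      have hm : c + (1 - c) % 5 = c := by omega
      have hm' : (c + 1) + (1 - (c + 1)) % 5 = c + 5 := by omega
      have hlen : (c + 1) + (xs.length : Int) = c + ((x :: xs).length : Int) := by
        push_cast [List.length_cons]; ring
      rw [hm, hm', hlen,
        pyRange5_cons c (c + ((x :: xs).length : Int)) (by push_cast [List.length_cons]; omega)]
      simp
    · rw [if_neg (by simp [PySem.Int.mod, Int.fmod_eq_emod, h])]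
      rw [ih acc (c + 1) (by omega)]
      have hm : (c + 1) + (1 - (c + 1)) % 5 = c + (1 - c) % 5 := by omega
      have hlen : (c + 1) + (xs.length : Int) = c + ((x :: xs).length : Int) := by
        push_cast [List.length_cons]; ring
      rw [hm, hlen]

-- ===== VERDICT (by name: the statement is the Claim_ definition above) =====
theorem calc_space_indices_above_upper_line_spec : Claim_equal_calc_space_indices_above_upper_line := by
  intro xs _
  show calc_space_indices_above_upper_line xs = calc_space_indices_above_upper_line_alt xs
  unfold calc_space_indices_above_upper_line calc_space_indices_above_upper_line_alt
  rw [loopA xs [] 0 le_rfl]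
  norm_num [PySem.List.len]
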